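-- pv_equiv track=rewrite | github.com/llouis0622/Algorithm_Deep_Dive | Programmers/Lv. 1/[카카오2022] 신고 결과 받기.py | solution
-- ===== SOURCE A (Python) =====
-- def solution(id_list, report, k):
--     report = set(report)
--     cnt = {user: 0 for user in id_list}
--     alert = {user: [] for user in id_list}
--     for i in report:
--         id, id2report = i.split()
--         alert[id].append(id2report)
--         cnt[id2report] += 1
--     stop = {user for user, count in cnt.items() if count >= k}
--     res = [0] * len(id_list)
--     for idx, user in enumerate(id_list):
--         res[idx] = sum(1 for reported_user in alert[user] if reported_user in stop)
--     return res
-- ===== SOURCE B (Python) =====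
-- def solution(id_list, report, k):
--     reports = set(report)
--     cnt = {user: 0 for user in id_list}
--     for r in reports:
--         reporter, reported = r.split()
--         cnt[reported] += 1
--     stop = {user for user, count in cnt.items() if count >= k}
--     scored = {user: 0 for user in id_list}
--     for r in reports:
--         reporter, reported = r.split()
--         if reported in stop:
--             scored[reporter] += 1
--     return [scored[user] for user in id_list]
-- ===== Notes on version B (the rewrite author's own statement) =====
-- stated objective: simpler
-- what changed: B drops A's reporter->reported-list table (alert) entirely: it counts per-reporter scores in one pass over the distinct reports (incrementing scored[reporter] when the reported user is stopped) instead of building per-user lists and re-scanning one list per id, and reads the answer off with a direct lookup per id.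
import Mathlib
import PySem

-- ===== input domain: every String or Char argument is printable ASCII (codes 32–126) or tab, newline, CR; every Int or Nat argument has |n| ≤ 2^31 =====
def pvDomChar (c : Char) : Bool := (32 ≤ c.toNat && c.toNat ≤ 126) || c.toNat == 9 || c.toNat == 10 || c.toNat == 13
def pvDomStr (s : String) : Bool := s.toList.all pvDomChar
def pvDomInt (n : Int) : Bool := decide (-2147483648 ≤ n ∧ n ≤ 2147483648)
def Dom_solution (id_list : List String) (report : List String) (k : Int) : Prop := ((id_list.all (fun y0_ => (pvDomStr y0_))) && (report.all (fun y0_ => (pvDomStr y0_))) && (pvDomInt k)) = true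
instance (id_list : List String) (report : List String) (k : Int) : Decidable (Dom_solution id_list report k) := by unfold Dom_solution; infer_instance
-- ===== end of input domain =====

-- B replaces A's reporter→reported-list table with a second counting pass over the distinct
-- reports (simpler decomposition, same cost); equivalence is about return values on Pre_.

-- ===== PORT A =====
-- loop body of A's 'for i in report: id, id2report = i.split(); alert[id].append(id2report); cnt[id2report] += 1'
-- (the wildcard branch is unreachable under Pre_: Python raises ValueError there)
def solA_step (s : PySem.Dict String Int × PySem.Dict String (List String)) (i : String) :
    PySem.Dict String Int × PySem.Dict String (List String) :=
  match PySem.Str.split₀ i with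
  | [id, id2report] => (s.1.modify id2report 0 (· + 1), s.2.modify id [] (· ++ [id2report]))
  | _ => s

def solution (id_list : List String) (report : List String) (k : Int) : List Int :=
  let rpt := PySem.Set.ofList report
  let cnt : PySem.Dict String Int := id_list.foldl (fun d user => d.insert user 0) PySem.Dict.empty
  let alert : PySem.Dict String (List String) := id_list.foldl (fun d user => d.insert user []) PySem.Dict.empty
  let st := rpt.foldl solA_step (cnt, alert)
  let stop := PySem.Set.ofList ((st.1.items.filter (fun p => decide (k ≤ p.2))).map (·.1))
  let res : List Int := List.replicate id_list.length 0
  (PySem.List.enumerate id_list 0).foldl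
    (fun r p => PySem.List.pySetD r p.1
      ((st.2.getD p.2 []).foldl (fun acc ru => if PySem.Set.contains stop ru then acc + 1 else acc) 0)) res

-- ===== PORT B =====
-- loop body of B's first pass 'reporter, reported = r.split(); cnt[reported] += 1'
def solB_cntStep (d : PySem.Dict String Int) (r : String) : PySem.Dict String Int :=
  match PySem.Str.split₀ r with
  | [_, reported] => d.modify reported 0 (· + 1)
  | _ => d

-- loop body of B's second pass 'if reported in stop: scored[reporter] += 1'
def solB_scoreStep (stop : PySem.Set String) (d : PySem.Dict String Int) (r : String) : PySem.Dict String Int :=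
  match PySem.Str.split₀ r with
  | [reporter, reported] => if PySem.Set.contains stop reported then d.modify reporter 0 (· + 1) else d
  | _ => d

def solution_alt (id_list : List String) (report : List String) (k : Int) : List Int :=
  let rpts := PySem.Set.ofList report
  let cnt0 : PySem.Dict String Int := id_list.foldl (fun d user => d.insert user 0) PySem.Dict.empty
  let cnt := rpts.foldl solB_cntStep cnt0
  let stop := PySem.Set.ofList ((cnt.items.filter (fun p => decide (k ≤ p.2))).map (·.1))
  let scored0 : PySem.Dict String Int := id_list.foldl (fun d user => d.insert user 0) PySem.Dict.empty
  let scored := rpts.foldl (solB_scoreStep stop) scored0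
  id_list.map (fun user => scored.getD user 0)

-- ===== PRECONDITION & SPEC =====
-- Pre_ excludes exactly the inputs on which Python A raises: a report that does not split
-- into exactly two words (ValueError on unpacking) or mentions an id absent from id_list (KeyError).
def Pre_solution (id_list : List String) (report : List String) (k : Int) : Prop :=
  (report.all (fun r => match PySem.Str.split₀ r with
      | [a, b] => id_list.contains a && id_list.contains b
      | _ => false)) = true
instance (id_list : List String) (report : List String) (k : Int) : Decidable (Pre_solution id_list report k) := by unfold Pre_solution; infer_instance

def pvWitness_solution : List String × List String × Int :=
  (["muzi", "frodo", "apeach"], ["muzi frodo", "apeach frodo", "frodo muzi"], 2)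

def Spec_solution (id_list : List String) (report : List String) (k : Int) (out : List Int) : Prop := out = solution_alt id_list report k
instance (id_list : List String) (report : List String) (k : Int) (out : List Int) : Decidable (Spec_solution id_list report k out) := by unfold Spec_solution; infer_instance

-- ===== CLAIM (what is proved, stated in full; the proofs are below) =====
def Claim_equal_solution : Prop := ∀ (id_list : List String) (report : List String) (k : Int), Dom_solution id_list report k → Pre_solution id_list report k → Spec_solution id_list report k (solution id_list report k)

-- ===== LEMMAS AND PROOFS =====

-- A's alert-table loop body, taken alone (second component of solA_step)
def pvAlertStep (d : PySem.Dict String (List String)) (i : String) : PySem.Dict String (List String) :=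
  match PySem.Str.split₀ i with
  | [id, id2report] => d.modify id [] (· ++ [id2report])
  | _ => d

theorem pv_fold_fst (rs : List String) :
    ∀ s : PySem.Dict String Int × PySem.Dict String (List String),
      (rs.foldl solA_step s).1 = rs.foldl solB_cntStep s.1 := by
  induction rs with
  | nil => intro s; rfl
  | cons r rs ih =>
    intro s
    simp only [List.foldl_cons]
    rw [ih]
    rcases h : PySem.Str.split₀ r with _ | ⟨a, _ | ⟨b, _ | ⟨c, t⟩⟩⟩ <;>
      simp [solA_step, solB_cntStep, h]

theorem pv_fold_snd (rs : List String) :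
    ∀ s : PySem.Dict String Int × PySem.Dict String (List String),
      (rs.foldl solA_step s).2 = rs.foldl pvAlertStep s.2 := by
  induction rs with
  | nil => intro s; rfl
  | cons r rs ih =>
    intro s
    simp only [List.foldl_cons]
    rw [ih]
    rcases h : PySem.Str.split₀ r with _ | ⟨a, _ | ⟨b, _ | ⟨c, t⟩⟩⟩ <;>
      simp [solA_step, pvAlertStep, h]

theorem pv_init_getD {ν : Type} (xs : List String) :
    ∀ (d : PySem.Dict String ν) (v0 : ν), (∀ u, d.getD u v0 = v0) →
      ∀ u, (xs.foldl (fun d user => d.insert user v0) d).getD u v0 = v0 := by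
  induction xs with
  | nil => intro d v0 h u; exact h u
  | cons x xs ih =>
    intro d v0 h u
    simp only [List.foldl_cons]
    exact ih _ _ (fun w => by rw [PySem.Dict.getD_insert]; split <;> simp [h]) u

-- the coupling invariant: scored[u] is the number of stopped users in alert[u]
theorem pv_main (stop : PySem.Set String) (rs : List String) :
    ∀ (dA : PySem.Dict String (List String)) (dB : PySem.Dict String Int),
      (∀ u, dB.getD u 0 = (((dA.getD u []).countP (fun x => PySem.Set.contains stop x) : Nat) : Int)) →
      ∀ u, (rs.foldl (solB_scoreStep stop) dB).getD u 0 =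
        (((rs.foldl pvAlertStep dA).getD u []).countP (fun x => PySem.Set.contains stop x) : Int) := by
  induction rs with
  | nil => intro dA dB h u; exact h u
  | cons r rs ih =>
    intro dA dB h u
    simp only [List.foldl_cons]
    apply ih
    intro w
    rcases hsp : PySem.Str.split₀ r with _ | ⟨a, _ | ⟨b, _ | ⟨c, t⟩⟩⟩ <;>
      simp only [solB_scoreStep, pvAlertStep, hsp]
    · exact h w
    · exact h w
    · rw [PySem.Dict.getD_modify]
      by_cases hin : PySem.Set.contains stop b = true
      · have hb : b ∈ stop := by simpa using hin
        rw [if_pos hin, PySem.Dict.getD_modify]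
        by_cases hw : w = a
        · subst hw
          simp only [if_pos rfl]
          rw [h w]
          simp [List.countP_append, hb]
        · simp only [if_neg hw]
          exact h w
      · have hb : b ∉ stop := by simpa using hin
        rw [if_neg hin]
        by_cases hw : w = a
        · subst hw
          simp only [if_pos rfl]
          rw [h w]
          simp [List.countP_append, hb]
        · simp only [if_neg hw]
          exact h w
    · exact h w

-- A's write-back through res = [0]*len + enumerate/pySetD builds exactly the map
theorem pv_res (f : String → Int) (xs : List String) :
    ∀ pre : List Int,
      (PySem.List.enumerate xs (pre.length : Int)).foldl
        (fun r p => PySem.List.pySetD r p.1 (f p.2)) (pre ++ List.replicate xs.length 0) =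
      pre ++ xs.map f := by
  induction xs with
  | nil => intro pre; simp [PySem.List.enumerate_nil]
  | cons x xs ih =>
    intro pre
    rw [PySem.List.enumerate_cons]
    simp only [List.foldl_cons, List.length_cons, List.replicate_succ]
    have h1 : PySem.List.pySetD (pre ++ 0 :: List.replicate xs.length 0) (pre.length : Int) (f x)
        = (pre ++ [f x]) ++ List.replicate xs.length 0 := by
      rw [PySem.List.pySetD_natCast]
      rw [List.set_append_right _ _ (le_refl _)]
      simp
    rw [h1]
    have h2 : ((pre.length : Int) + 1) = (((pre ++ [f x]).length : Nat) : Int) := by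
      simp
    rw [h2, ih (pre ++ [f x])]
    simp

-- ===== VERDICT (by name: the statement is the Claim_ definition above) =====
theorem solution_spec : Claim_equal_solution := by
  intro id_list report k _hdom _hpre
  unfold Spec_solution solution solution_alt
  simp only []
  rw [pv_fold_fst, pv_fold_snd]
  set rpts := PySem.Set.ofList report with hrpts
  set cnt0 : PySem.Dict String Int := id_list.foldl (fun d user => d.insert user 0) PySem.Dict.empty with hcnt0
  set alert0 : PySem.Dict String (List String) := id_list.foldl (fun d user => d.insert user []) PySem.Dict.empty with halert0
  set stop := PySem.Set.ofList (((rpts.foldl solB_cntStep cnt0).items.filter (fun p => decide (k ≤ p.2))).map (·.1)) with hstop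
  have hres := pv_res
    (fun u => ((rpts.foldl pvAlertStep alert0).getD u []).foldl
      (fun acc ru => if PySem.Set.contains stop ru then acc + 1 else acc) 0)
    id_list ([] : List Int)
  simp only [List.length_nil, Int.natCast_zero, List.nil_append] at hres
  rw [hres]
  apply List.map_congr_left
  intro u _
  rw [PySem.List.foldl_if_add_one]
  have hinv : ∀ w, ((id_list.foldl (fun d user => d.insert user (0:Int)) PySem.Dict.empty).getD w 0)
      = (((alert0.getD w []).countP (fun x => PySem.Set.contains stop x) : Nat) : Int) := by
    intro w
    rw [← hcnt0]
    rw [pv_init_getD id_list PySem.Dict.empty ([] : List String) (fun u => by simp [PySem.Dict.getD_empty]) w]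
    rw [pv_init_getD id_list PySem.Dict.empty (0 : Int) (fun u => by simp [PySem.Dict.getD_empty]) w]
    simp
  rw [pv_main stop rpts alert0 cnt0 (by intro w; rw [hcnt0]; exact hinv w) u]
  rw [zero_add]
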